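-- pv_equiv track=rewrite | github.com/UKGANG/Leetcode | data_structure/monostack/StockPurchase.py | _purchase
-- ===== SOURCE A (Python) =====
-- from typing import List
--
-- def _purchase(prices: List[int]):
--     stack = []
--     res = 0
--     for i in range(len(prices) - 1, -1, -1):
--         while stack and stack[-1] <= prices[i]:
--             stack.pop()
--         stack.append(prices[i])
--         res += stack[0] - prices[i]
--     return res
-- ===== SOURCE B (Python) =====
-- from typing import List
--
-- def _purchase(prices: List[int]):
--     res = 0
--     running = None
--     for p in reversed(prices):
--         if running is None or p > running:
--             running = p
--         res += running - p
--     return res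
-- ===== Notes on version B (the rewrite author's own statement) =====
-- stated objective: simpler
-- what changed: Replaces the monotonic stack and its inner pop-while loop with a single scalar suffix running maximum updated in one right-to-left pass.
import Mathlib
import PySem

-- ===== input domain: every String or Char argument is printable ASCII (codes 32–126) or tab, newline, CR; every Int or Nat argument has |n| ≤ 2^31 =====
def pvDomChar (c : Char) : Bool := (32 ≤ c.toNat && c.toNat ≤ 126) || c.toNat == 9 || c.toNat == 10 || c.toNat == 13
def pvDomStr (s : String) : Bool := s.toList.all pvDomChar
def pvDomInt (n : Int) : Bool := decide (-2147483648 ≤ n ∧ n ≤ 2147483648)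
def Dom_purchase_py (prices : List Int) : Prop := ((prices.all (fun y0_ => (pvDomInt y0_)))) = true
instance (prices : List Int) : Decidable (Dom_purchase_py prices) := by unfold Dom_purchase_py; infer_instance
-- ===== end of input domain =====

-- B replaces A's monotonic stack (and its inner pop-while loop) by a single scalar suffix running maximum: simpler, O(1) space, same return value.


-- ===== PORT A =====
-- inner 'while stack and stack[-1] <= prices[i]: stack.pop()'; stack is kept top-first
-- (Python's stack reversed): append = cons, stack[-1] = head, stack[0] = getLast.
def popWhile (p : Int) : List Int → List Int
  | [] => []
  | t :: rest => if t ≤ p then popWhile p rest else t :: rest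

def stepA (sr : List Int × Int) (p : Int) : List Int × Int :=
  let st := p :: popWhile p sr.1
  (st, sr.2 + st.getLastD 0 - p)

-- the 'for i in range(len(prices)-1, -1, -1)' loop visits prices back to front = prices.reverse
def purchase_py (prices : List Int) : Int :=
  (prices.reverse.foldl stepA ([], 0)).2

-- ===== PORT B =====
def stepB (sr : Option Int × Int) (p : Int) : Option Int × Int :=
  let m := match sr.1 with
    | none => p
    | some q => if p > q then p else q
  (some m, sr.2 + m - p)

def purchase_py_alt (prices : List Int) : Int :=
  (prices.reverse.foldl stepB (none, 0)).2

-- ===== PRECONDITION & SPEC =====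
def Spec_purchase_py (prices : List Int) (out : Int) : Prop := out = purchase_py_alt prices
instance (prices : List Int) (out : Int) : Decidable (Spec_purchase_py prices out) := by unfold Spec_purchase_py; infer_instance

-- ===== CLAIM (what is proved, stated in full; the proofs are below) =====
def Claim_equal_purchase_py : Prop := ∀ (prices : List Int), Dom_purchase_py prices → Spec_purchase_py prices (purchase_py prices)

-- ===== LEMMAS AND PROOFS =====

-- loop invariant: the stack is strictly increasing top-to-bottom, so its last entry is the suffix max
theorem popWhile_all_le (p : Int) (st : List Int) (h : ∀ x ∈ st, x ≤ p) :
    popWhile p st = [] := by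
  induction st with
  | nil => rfl
  | cons a rest ih =>
      simp only [popWhile, h a (by simp)]
      exact ih (fun x hx => h x (by simp [hx]))

theorem pw_le_getLast (st : List Int) (q : Int)
    (h : List.Pairwise (· < ·) st) (hq : st.getLast? = some q) : ∀ x ∈ st, x ≤ q := by
  intro x hx
  rcases eq_or_ne x q with h1 | h1
  · omega
  · have hqm : q ∈ st := List.mem_of_getLast? hq
    -- x appears before q or after; with getLast? = q and pairwise <, x < q unless x = q
    rcases List.getLast?_eq_some_iff.mp hq with ⟨l', rfl⟩
    have hx' : x ∈ l' := by
      rcases List.mem_append.mp hx with h2 | h2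
      · exact h2
      · simp at h2; omega
    have := (List.pairwise_append.mp h).2.2 x hx' q (by simp)
    omega

theorem popWhile_lt (p q : Int) (st : List Int)
    (h : List.Pairwise (· < ·) st) (hq : st.getLast? = some q) (hpq : p < q) :
    (popWhile p st).getLast? = some q ∧ List.Pairwise (· < ·) (popWhile p st) ∧
      ∀ x ∈ popWhile p st, p < x := by
  induction st with
  | nil => simp at hq
  | cons a rest ih =>
      obtain ⟨hfa, hrest⟩ := List.pairwise_cons.mp h
      by_cases hap : a ≤ p
      · cases rest with
        | nil => simp at hq; omega
        | cons b rest' =>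
            have hq' : (b :: rest').getLast? = some q := by
              simpa [List.getLast?_cons] using hq
            have := ih hrest hq'
            simpa [popWhile, hap] using this
      · refine ⟨?_, ?_, ?_⟩
        · simpa [popWhile, hap] using hq
        · simpa [popWhile, hap] using h
        · intro x hx
          simp only [popWhile, if_neg hap] at hx
          rcases List.mem_cons.mp hx with rfl | hx
          · omega
          · have := hfa x hx; omega

theorem step_inv (st : List Int) (om : Option Int) (r : Int) (p : Int)
    (hpw : List.Pairwise (· < ·) st) (hlast : st.getLast? = om) :
    List.Pairwise (· < ·) (stepA (st, r) p).1 ∧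
      (stepA (st, r) p).1.getLast? = (stepB (om, r) p).1 ∧
      (stepA (st, r) p).2 = (stepB (om, r) p).2 := by
  cases hq : st.getLast? with
  | none =>
      rw [hq] at hlast; subst hlast
      have hnil : st = [] := List.getLast?_eq_none_iff.mp hq
      subst hnil
      simp [stepA, stepB, popWhile]
  | some q =>
      rw [hq] at hlast; subst hlast
      by_cases hpq : p < q
      · obtain ⟨h1, h2, h3⟩ := popWhile_lt p q st hpw hq hpq
        have hlast2 : (p :: popWhile p st).getLast? = some q := by
          cases hpwq : popWhile p st with
          | nil => rw [hpwq] at h1; simp at h1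
          | cons c cs => rw [hpwq] at h1; simpa [List.getLast?_cons] using h1
        have hpair2 : List.Pairwise (· < ·) (p :: popWhile p st) :=
          List.pairwise_cons.mpr ⟨h3, h2⟩
        refine ⟨hpair2, ?_, ?_⟩
        · simp [stepA, stepB, hlast2, show ¬ p > q by omega]
        · simp [stepA, stepB, List.getLastD_eq_getLast?, hlast2, show ¬ p > q by omega]
      · have hall : ∀ x ∈ st, x ≤ p := by
          intro x hx
          have := pw_le_getLast st q hpw hq x hx
          omega
        have hempty : popWhile p st = [] := popWhile_all_le p st hall
        by_cases hgt : p > q <;>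
          · simp [stepA, stepB, hempty, hgt]
            try omega

theorem fold_inv (l : List Int) : ∀ (st : List Int) (om : Option Int) (r : Int),
    List.Pairwise (· < ·) st → st.getLast? = om →
    List.Pairwise (· < ·) (l.foldl stepA (st, r)).1 ∧
      (l.foldl stepA (st, r)).1.getLast? = (l.foldl stepB (om, r)).1 ∧
      (l.foldl stepA (st, r)).2 = (l.foldl stepB (om, r)).2 := by
  induction l with
  | nil => intro st om r h1 h2; exact ⟨h1, h2, rfl⟩
  | cons p l ih =>
      intro st om r h1 h2
      obtain ⟨g1, g2, g3⟩ := step_inv st om r p h1 h2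
      rw [List.foldl_cons, List.foldl_cons,
        (by rfl : stepA (st, r) p = ((stepA (st, r) p).1, (stepA (st, r) p).2)),
        (by rfl : stepB (om, r) p = ((stepB (om, r) p).1, (stepB (om, r) p).2)), g3]
      exact ih _ _ _ g1 g2

-- ===== VERDICT (by name: the statement is the Claim_ definition above) =====
theorem purchase_py_spec : Claim_equal_purchase_py := by
  intro prices _
  unfold Spec_purchase_py purchase_py purchase_py_alt
  exact (fold_inv prices.reverse [] none 0 (by simp) rfl).2.2
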